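-- pv_equiv track=rewrite | github.com/danieleschmidt/privacy-preserving-agent-finetuner | privacy_finetuner/global_first/advanced_compliance_engine.py | _generate_requirement_recommendations
-- ===== SOURCE A (Python) =====
-- from typing import Any, Dict, List, Optional, Set, Tuple, Union
--
-- def _generate_requirement_recommendations(gaps: List[str]) -> List[str]:
--     """Generate recommendations based on identified gaps."""
--     recommendations = []
--
--     for gap in gaps:
--         if "consent management" in gap.lower():
--             recommendations.append("Implement comprehensive consent management system")
--         elif "privacy notices" in gap.lower():
--             recommendations.append("Deploy clear and accessible privacy notices")
--         elif "lawful basis" in gap.lower():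
--             recommendations.append("Implement lawful basis tracking and documentation")
--         elif "purpose" in gap.lower():
--             recommendations.append("Define and enforce data processing purposes")
--         elif "differential privacy" in gap.lower():
--             recommendations.append("Enable differential privacy for data protection")
--         elif "encryption" in gap.lower():
--             recommendations.append("Implement end-to-end encryption")
--         elif "access controls" in gap.lower():
--             recommendations.append("Deploy role-based access controls")
--         elif "monitoring" in gap.lower():
--             recommendations.append("Enable comprehensive security monitoring")
--         else:
--             recommendations.append(f"Address gap: {gap}")
--
--     return recommendations
-- ===== SOURCE B (Python) =====
-- _RULES = [
--     ("consent management", "Implement comprehensive consent management system"),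
--     ("privacy notices", "Deploy clear and accessible privacy notices"),
--     ("lawful basis", "Implement lawful basis tracking and documentation"),
--     ("purpose", "Define and enforce data processing purposes"),
--     ("differential privacy", "Enable differential privacy for data protection"),
--     ("encryption", "Implement end-to-end encryption"),
--     ("access controls", "Deploy role-based access controls"),
--     ("monitoring", "Enable comprehensive security monitoring"),
-- ]
--
--
-- def _generate_requirement_recommendations(gaps):
--     """Generate recommendations based on identified gaps (rule-major staged passes)."""
--     lows = [gap.lower() for gap in gaps]
--     res = [None] * len(gaps)
--     for sub, rec in _RULES:
--         for i, low in enumerate(lows):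
--             if res[i] is None and sub in low:
--                 res[i] = rec
--     return [r if r is not None else f"Address gap: {gap}" for gap, r in zip(gaps, res)]
-- ===== Notes on version B (the rewrite author's own statement) =====
-- stated objective: alternative
-- what changed: Inverted the loop nesting: instead of scanning the elif chain per gap (gap-major), B makes one staged pass over the gap list per rule in priority order (rule-major), filling each still-unresolved slot on its first matching rule, then fills the leftovers with the fallback string.
import Mathlib
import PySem

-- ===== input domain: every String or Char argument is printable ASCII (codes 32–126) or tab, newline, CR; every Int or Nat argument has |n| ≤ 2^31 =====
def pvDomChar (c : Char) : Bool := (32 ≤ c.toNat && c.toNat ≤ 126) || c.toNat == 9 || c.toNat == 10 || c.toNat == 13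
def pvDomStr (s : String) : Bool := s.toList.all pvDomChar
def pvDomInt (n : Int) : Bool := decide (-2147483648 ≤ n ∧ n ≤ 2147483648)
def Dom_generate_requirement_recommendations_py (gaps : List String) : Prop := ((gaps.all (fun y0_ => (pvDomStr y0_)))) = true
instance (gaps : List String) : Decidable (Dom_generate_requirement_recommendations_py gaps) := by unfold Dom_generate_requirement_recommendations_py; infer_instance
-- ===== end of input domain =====

-- B inverts A's loop nesting: one staged pass over the gaps per rule (rule-major), filling
-- each unresolved slot on its first matching rule, then a fallback pass; same cost, alternative structure.


-- ===== PORT A =====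
-- Literal transliteration of A: a loop appending one recommendation per gap via an if/elif chain.
def generate_requirement_recommendations_py (gaps : List String) : List String :=
  gaps.foldl (fun recommendations gap =>
    if PySem.Str.isIn "consent management" (PySem.Str.lower gap) then
      recommendations ++ ["Implement comprehensive consent management system"]
    else if PySem.Str.isIn "privacy notices" (PySem.Str.lower gap) then
      recommendations ++ ["Deploy clear and accessible privacy notices"]
    else if PySem.Str.isIn "lawful basis" (PySem.Str.lower gap) then
      recommendations ++ ["Implement lawful basis tracking and documentation"]
    else if PySem.Str.isIn "purpose" (PySem.Str.lower gap) then
      recommendations ++ ["Define and enforce data processing purposes"]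
    else if PySem.Str.isIn "differential privacy" (PySem.Str.lower gap) then
      recommendations ++ ["Enable differential privacy for data protection"]
    else if PySem.Str.isIn "encryption" (PySem.Str.lower gap) then
      recommendations ++ ["Implement end-to-end encryption"]
    else if PySem.Str.isIn "access controls" (PySem.Str.lower gap) then
      recommendations ++ ["Deploy role-based access controls"]
    else if PySem.Str.isIn "monitoring" (PySem.Str.lower gap) then
      recommendations ++ ["Enable comprehensive security monitoring"]
    else
      recommendations ++ ["Address gap: " ++ gap]) []

-- ===== PORT B =====
-- B's ordered rule table.
def pvRules : List (String × String) :=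
  [("consent management", "Implement comprehensive consent management system"),
   ("privacy notices", "Deploy clear and accessible privacy notices"),
   ("lawful basis", "Implement lawful basis tracking and documentation"),
   ("purpose", "Define and enforce data processing purposes"),
   ("differential privacy", "Enable differential privacy for data protection"),
   ("encryption", "Implement end-to-end encryption"),
   ("access controls", "Deploy role-based access controls"),
   ("monitoring", "Enable comprehensive security monitoring")]

-- one slot update inside the inner pass: 'if res[i] is None and sub in low: res[i] = rec'
def pvStep (low : String) (o : Option String) (rule : String × String) : Option String :=
  match o with
  | some v => some v
  | none => if PySem.Str.isIn rule.1 low then some rule.2 else none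

-- the inner pass over all slots for one rule ('for i, low in enumerate(lows): …')
def pvApplyRule (lows : List String) (res : List (Option String)) (rule : String × String) :
    List (Option String) :=
  List.zipWith (fun low o => pvStep low o rule) lows res

def generate_requirement_recommendations_py_alt (gaps : List String) : List String :=
  -- lows = [gap.lower() for gap in gaps]; res starts all-none, then the rules pass over it
  List.zipWith (fun gap o =>
    match o with
    | some v => v
    | none => "Address gap: " ++ gap) gaps
    (pvRules.foldl (pvApplyRule (gaps.map PySem.Str.lower))
      ((gaps.map PySem.Str.lower).map (fun _ => none)))

-- ===== PRECONDITION & SPEC =====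
def Spec_generate_requirement_recommendations_py (gaps : List String) (out : List String) : Prop := out = generate_requirement_recommendations_py_alt gaps
instance (gaps : List String) (out : List String) : Decidable (Spec_generate_requirement_recommendations_py gaps out) := by unfold Spec_generate_requirement_recommendations_py; infer_instance

-- ===== CLAIM =====
def Claim_equal_generate_requirement_recommendations_py : Prop := ∀ (gaps : List String), Dom_generate_requirement_recommendations_py gaps → Spec_generate_requirement_recommendations_py gaps (generate_requirement_recommendations_py gaps)

-- ===== LEMMAS AND PROOFS =====

theorem pv_zipWith_map_self {α β γ : Type} (f : α → β → γ) (g : α → β) (xs : List α) :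
    List.zipWith f xs (xs.map g) = xs.map (fun x => f x (g x)) := by
  induction xs with
  | nil => rfl
  | cons x xs ih => simp [ih]

theorem pv_zipWith_fuse {α β : Type} (f g : α → β → β) (xs : List α) (ys : List β) :
    List.zipWith f xs (List.zipWith g xs ys) = List.zipWith (fun x y => f x (g x y)) xs ys := by
  induction xs generalizing ys with
  | nil => rfl
  | cons x xs ih => cases ys with
    | nil => rfl
    | cons y ys => simp [ih]

theorem pv_zipWith_id {α β : Type} (xs : List α) (ys : List β) (h : ys.length ≤ xs.length) :
    List.zipWith (fun _ y => y) xs ys = ys := by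
  induction xs generalizing ys with
  | nil => cases ys with
    | nil => rfl
    | cons y ys => simp at h
  | cons x xs ih => cases ys with
    | nil => rfl
    | cons y ys => simp at h ⊢; exact ih ys h

-- rule-major fold over slot lists = per-slot fold over the rules
theorem pv_foldl_applyRule (rules : List (String × String)) (lows : List String)
    (r0 : List (Option String)) (h : r0.length ≤ lows.length) :
    rules.foldl (pvApplyRule lows) r0 =
      List.zipWith (fun low o => rules.foldl (pvStep low) o) lows r0 := by
  induction rules generalizing r0 with
  | nil => simpa using (pv_zipWith_id lows r0 h).symm
  | cons rule rules ih =>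
      have hlen : (pvApplyRule lows r0 rule).length ≤ lows.length := by
        simp [pvApplyRule, List.length_zipWith]
      calc (rule :: rules).foldl (pvApplyRule lows) r0
          = rules.foldl (pvApplyRule lows) (pvApplyRule lows r0 rule) := rfl
        _ = List.zipWith (fun low o => rules.foldl (pvStep low) o) lows (pvApplyRule lows r0 rule) :=
            ih _ hlen
        _ = List.zipWith (fun low o => (rule :: rules).foldl (pvStep low) o) lows r0 := by
            simp [pvApplyRule, pv_zipWith_fuse]

theorem pv_foldl_step_some (rules : List (String × String)) (low v : String) :
    rules.foldl (pvStep low) (some v) = some v := by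
  induction rules with
  | nil => rfl
  | cons r rs ih => simpa [pvStep] using ih

theorem pv_foldl_step_none (rules : List (String × String)) (low : String) :
    rules.foldl (pvStep low) none =
      (rules.find? (fun p => PySem.Str.isIn p.1 low)).map (fun p => p.2) := by
  induction rules with
  | nil => rfl
  | cons r rs ih =>
      simp only [PySem.Str.isIn] at ih ⊢
      by_cases h : PySem.Chars.isIn r.1.toList low.toList
      · simp [List.foldl, pvStep, PySem.Str.isIn, h, List.find?, pv_foldl_step_some]
      · simp [List.foldl, pvStep, PySem.Str.isIn, h, List.find?, ih]

-- B's per-gap value, as computed through the staged passes.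
theorem pv_alt_eq_map (gaps : List String) :
    generate_requirement_recommendations_py_alt gaps =
      gaps.map (fun gap =>
        match (pvRules.find? (fun p => PySem.Str.isIn p.1 (PySem.Str.lower gap))).map
            (fun p => p.2) with
        | some v => v
        | none => "Address gap: " ++ gap) := by
  unfold generate_requirement_recommendations_py_alt
  rw [pv_foldl_applyRule _ _ _ (by simp)]
  rw [pv_zipWith_map_self, List.map_map, pv_zipWith_map_self]
  simp [pv_foldl_step_none]

-- per-gap agreement with A's elif chain
theorem pv_chain_eq (gap : String) :
    (match (pvRules.find? (fun p => PySem.Str.isIn p.1 (PySem.Str.lower gap))).map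
        (fun p => p.2) with
     | some v => v
     | none => "Address gap: " ++ gap) =
      (if PySem.Str.isIn "consent management" (PySem.Str.lower gap) then
        "Implement comprehensive consent management system"
      else if PySem.Str.isIn "privacy notices" (PySem.Str.lower gap) then
        "Deploy clear and accessible privacy notices"
      else if PySem.Str.isIn "lawful basis" (PySem.Str.lower gap) then
        "Implement lawful basis tracking and documentation"
      else if PySem.Str.isIn "purpose" (PySem.Str.lower gap) then
        "Define and enforce data processing purposes"
      else if PySem.Str.isIn "differential privacy" (PySem.Str.lower gap) then
        "Enable differential privacy for data protection"
      else if PySem.Str.isIn "encryption" (PySem.Str.lower gap) then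
        "Implement end-to-end encryption"
      else if PySem.Str.isIn "access controls" (PySem.Str.lower gap) then
        "Deploy role-based access controls"
      else if PySem.Str.isIn "monitoring" (PySem.Str.lower gap) then
        "Enable comprehensive security monitoring"
      else
        "Address gap: " ++ gap) := by
  simp only [pvRules, List.find?]
  split_ifs <;> simp_all

-- ===== VERDICT =====
theorem generate_requirement_recommendations_py_spec : Claim_equal_generate_requirement_recommendations_py := by
  intro gaps _
  show generate_requirement_recommendations_py gaps = generate_requirement_recommendations_py_alt gaps
  rw [pv_alt_eq_map]
  unfold generate_requirement_recommendations_py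
  have hstep : ∀ (recommendations : List String) (gap : String),
      (if PySem.Str.isIn "consent management" (PySem.Str.lower gap) then
        recommendations ++ ["Implement comprehensive consent management system"]
      else if PySem.Str.isIn "privacy notices" (PySem.Str.lower gap) then
        recommendations ++ ["Deploy clear and accessible privacy notices"]
      else if PySem.Str.isIn "lawful basis" (PySem.Str.lower gap) then
        recommendations ++ ["Implement lawful basis tracking and documentation"]
      else if PySem.Str.isIn "purpose" (PySem.Str.lower gap) then
        recommendations ++ ["Define and enforce data processing purposes"]
      else if PySem.Str.isIn "differential privacy" (PySem.Str.lower gap) then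
        recommendations ++ ["Enable differential privacy for data protection"]
      else if PySem.Str.isIn "encryption" (PySem.Str.lower gap) then
        recommendations ++ ["Implement end-to-end encryption"]
      else if PySem.Str.isIn "access controls" (PySem.Str.lower gap) then
        recommendations ++ ["Deploy role-based access controls"]
      else if PySem.Str.isIn "monitoring" (PySem.Str.lower gap) then
        recommendations ++ ["Enable comprehensive security monitoring"]
      else
        recommendations ++ ["Address gap: " ++ gap]) =
      recommendations ++
        [(match (pvRules.find? (fun p => PySem.Str.isIn p.1 (PySem.Str.lower gap))).map
            (fun p => p.2) with
          | some v => v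
          | none => "Address gap: " ++ gap)] := by
    intro recommendations gap
    rw [pv_chain_eq]
    split_ifs <;> rfl
  simp only [hstep]
  rw [PySem.List.foldl_append_singleton_eq_map]
  rfl
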